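-- pv_equiv track=rewrite | github.com/NASUNJIN/Algorithm | BAEKJOON/SILVER/[BOJ_S2] 1406_에디터.py | solution_stack
-- ===== SOURCE A (Python) =====
-- def solution_stack(str, C):
--   # 초기 문자열 저장
--   left_stack = list(str)  # 커서 기준 왼쪽
--   right_stack = []        # 커서 기준 오른쪽
--
--   # 명령어 처리
--   for command in C:
--     if command == 'L':
--       if left_stack:   # 왼쪽으로 이동
--         right_stack.append(left_stack.pop())
--     elif command == 'D':
--       if right_stack:  # 오른쪽으로 이동
--         left_stack.append(right_stack.pop())
--     elif command == 'B':
--       if left_stack:   # 왼쪽 문자 삭제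
--         left_stack.pop()
--     elif command.startswith('P '):
--       _, char = command.split()  # 문자 추가
--       left_stack.append(char)
--
--   result = ''.join(left_stack) + ''.join(reversed(right_stack))
--   return result
-- ===== SOURCE B (Python) =====
-- def solution_stack(str, C):
--   # Single buffer + integer cursor instead of two stacks.
--   buf = list(str)
--   cursor = len(buf)
--   for command in C:
--     if command == 'L':
--       if cursor > 0:
--         cursor -= 1
--     elif command == 'D':
--       if cursor < len(buf):
--         cursor += 1
--     elif command == 'B':
--       if cursor > 0:
--         cursor -= 1
--         del buf[cursor]
--     elif command.startswith('P '):
--       _, char = command.split()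
--       buf.insert(cursor, char)
--       cursor += 1
--   return ''.join(buf)
-- ===== Notes on version B (the rewrite author's own statement) =====
-- stated objective: idiomatic
-- what changed: Replaces the two cursor stacks (left/right with push/pop shuffling) by a single in-place buffer plus an integer cursor: L/D just move the cursor, B deletes at cursor-1, P inserts at the cursor.
import Mathlib
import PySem

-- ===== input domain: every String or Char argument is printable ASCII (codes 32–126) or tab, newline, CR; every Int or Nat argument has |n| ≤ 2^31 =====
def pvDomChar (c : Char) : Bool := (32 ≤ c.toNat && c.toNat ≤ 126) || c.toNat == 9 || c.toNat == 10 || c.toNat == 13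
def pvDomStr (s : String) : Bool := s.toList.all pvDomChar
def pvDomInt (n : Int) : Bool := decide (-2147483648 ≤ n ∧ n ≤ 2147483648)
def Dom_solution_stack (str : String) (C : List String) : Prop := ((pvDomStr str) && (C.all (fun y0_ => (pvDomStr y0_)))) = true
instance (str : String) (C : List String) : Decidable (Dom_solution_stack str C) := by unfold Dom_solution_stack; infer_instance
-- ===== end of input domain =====

-- B replaces A's two cursor stacks by a single buffer with an integer cursor (idiomatic editor state).

-- ===== PORT A =====
-- Stacks are Lists with the TOP AT THE HEAD (Python append/pop at the end = cons/head here).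
-- The 'P ' command with a split of length ≠ 2 raises ValueError in Python: excluded by Pre_; fallback is a no-op.
def stepA (st : List String × List String) (command : String) : List String × List String :=
  let (left, right) := st
  if command = "L" then
    match left with
    | h :: t => (t, h :: right)
    | [] => (left, right)
  else if command = "D" then
    match right with
    | h :: t => (h :: left, t)
    | [] => (left, right)
  else if command = "B" then
    match left with
    | _ :: t => (t, right)
    | [] => (left, right)
  else if PySem.Str.startswith command "P " then
    match PySem.Str.split₀ command with
    | [_, ch] => (ch :: left, right)
    | _ => (left, right)
  else (left, right)

def solution_stack (str : String) (C : List String) : String :=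
  -- left_stack = list(str): list of 1-char strings; stored top-at-head, so reversed
  let st := C.foldl stepA ((str.toList.map (fun c => String.ofList [c])).reverse, [])
  -- ''.join(left_stack) + ''.join(reversed(right_stack))
  PySem.Str.join "" st.1.reverse ++ PySem.Str.join "" st.2

-- ===== PORT B =====
-- Python's cursor is an int kept in [0, len(buf)] by the guards; ported as a Nat.
def stepB (st : List String × Nat) (command : String) : List String × Nat :=
  let (buf, cursor) := st
  if command = "L" then
    if cursor > 0 then (buf, cursor - 1) else (buf, cursor)
  else if command = "D" then
    if cursor < buf.length then (buf, cursor + 1) else (buf, cursor)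
  else if command = "B" then
    if cursor > 0 then (buf.eraseIdx (cursor - 1), cursor - 1) else (buf, cursor)
  else if PySem.Str.startswith command "P " then
    match PySem.Str.split₀ command with
    | [_, ch] => (PySem.List.insert buf (cursor : Int) ch, cursor + 1)
    | _ => (buf, cursor)
  else (buf, cursor)

def solution_stack_alt (str : String) (C : List String) : String :=
  let buf0 := str.toList.map (fun c => String.ofList [c])
  let st := C.foldl stepB (buf0, buf0.length)
  PySem.Str.join "" st.1

-- ===== PRECONDITION & SPEC =====
-- Pre_ excludes exactly the commands on which A raises ValueError ('P '-prefixed commands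
-- whose .split() does not yield exactly two fields, e.g. 'P ' or 'P x y').
def Pre_solution_stack (str : String) (C : List String) : Prop :=
  ∀ c ∈ C, PySem.Str.startswith c "P " = true → (PySem.Str.split₀ c).length = 2
instance (str : String) (C : List String) : Decidable (Pre_solution_stack str C) := by unfold Pre_solution_stack; infer_instance

def pvWitness_solution_stack : String × List String := ("abc", ["L", "P x", "B", "D", "Q"])

def Spec_solution_stack (str : String) (C : List String) (out : String) : Prop := out = solution_stack_alt str C
instance (str : String) (C : List String) (out : String) : Decidable (Spec_solution_stack str C out) := by unfold Spec_solution_stack; infer_instance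

-- ===== CLAIM (what is proved, stated in full; the proofs are below) =====
def Claim_equal_solution_stack : Prop := ∀ (str : String) (C : List String), Dom_solution_stack str C → Pre_solution_stack str C → Spec_solution_stack str C (solution_stack str C)

-- ===== LEMMAS AND PROOFS =====

-- Invariant: B's state (buf, cursor) is (left.reverse ++ right, left.length) for A's state (left, right).
theorem stepB_of_stepA (left right : List String) (c : String) :
    stepB (left.reverse ++ right, left.length) c =
      ((stepA (left, right) c).1.reverse ++ (stepA (left, right) c).2,
       (stepA (left, right) c).1.length) := by
  unfold stepA stepB
  by_cases hL : c = "L"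
  · subst hL
    cases left with
    | nil => simp
    | cons h t => simp
  · by_cases hD : c = "D"
    · subst hD
      cases right with
      | nil => simp
      | cons h t => simp
    · by_cases hB : c = "B"
      · subst hB
        cases left with
        | nil => simp
        | cons h t =>
          have he : (t.reverse ++ h :: right).eraseIdx t.length = t.reverse ++ right := by
            rw [List.eraseIdx_append_of_length_le (by simp), List.length_reverse]
            simp
          simp [he]
      · simp only [hL, hD, hB, reduceIte]
        by_cases hP : PySem.Str.startswith c "P " = true
        · simp only [if_pos hP]
          cases hsp : PySem.Str.split₀ c with
          | nil => simp
          | cons a tl =>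
            cases tl with
            | nil => simp
            | cons b tl2 =>
              cases tl2 with
              | nil =>
                have hi : PySem.List.insert (left.reverse ++ right) (left.length : Int) b
                    = left.reverse ++ b :: right := by
                  rw [PySem.List.insert_natCast _ _ _ (by simp)]
                  rw [← List.length_reverse (as := left), List.take_left, List.drop_left]
                simp [hi]
              | cons x xs => simp
        · simp only [if_neg hP]

theorem foldl_inv (C : List String) (left right : List String) :
    C.foldl stepB (left.reverse ++ right, left.length) =
      ((C.foldl stepA (left, right)).1.reverse ++ (C.foldl stepA (left, right)).2,
       (C.foldl stepA (left, right)).1.length) := by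
  induction C generalizing left right with
  | nil => simp
  | cons c cs ih =>
    simp only [List.foldl_cons]
    rw [stepB_of_stepA]
    exact ih _ _

theorem join_empty_flatten (l : List (List Char)) : PySem.Chars.join [] l = l.flatten := by
  induction l with
  | nil => rfl
  | cons a t ih =>
    cases t with
    | nil => simp [PySem.Chars.join, List.intercalate]
    | cons b t2 =>
      rw [PySem.Chars.join_cons_cons, ih]
      simp

theorem join_append (xs ys : List String) :
    PySem.Str.join "" (xs ++ ys) = PySem.Str.join "" xs ++ PySem.Str.join "" ys := by
  simp only [PySem.Str.join, String.toList_empty, List.map_append]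
  rw [join_empty_flatten, join_empty_flatten, join_empty_flatten,
    List.flatten_append, String.ofList_append]

-- ===== VERDICT (by name: the statement is the Claim_ definition above) =====
theorem solution_stack_spec : Claim_equal_solution_stack := by
  intro str C _ _
  unfold Spec_solution_stack solution_stack solution_stack_alt
  have h := foldl_inv C (str.toList.map (fun c => String.ofList [c])).reverse []
  simp only [List.reverse_reverse, List.append_nil, List.length_reverse] at h
  simp only [h, join_append]
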